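-- pv_equiv track=rewrite | github.com/ldct/cp | codeforces/E115/D/D.py | freq_par_side
-- ===== SOURCE A (Python) =====
-- from collections import Counter
--
-- def freq_par_side(problems, idx):
--     xs = set([p[idx] for p in problems])
--     freqs_idx = Counter([p[idx] for p in problems])
--     total = len(problems)
--
--     ret = 0
--     for num_line in freqs_idx.values():
--         num_rest = total - num_line
--         ret += (num_line*(num_line-1)//2) * num_rest
--
--     return ret
-- ===== SOURCE B (Python) =====
-- from itertools import groupby
--
-- def freq_par_side(problems, idx):
--     total = len(problems)
--     ret = 0
--     for _, run in groupby(sorted(p[idx] for p in problems)):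
--         f = sum(1 for _ in run)
--         ret += (f * (f - 1) // 2) * (total - f)
--     return ret
-- ===== Notes on version B (the rewrite author's own statement) =====
-- stated objective: alternative
-- what changed: Replaces the Counter hash-frequency table (and the unused set) by sorting the extracted values and scanning consecutive equal runs with itertools.groupby, accumulating the same per-value formula from run lengths.
import Mathlib
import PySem

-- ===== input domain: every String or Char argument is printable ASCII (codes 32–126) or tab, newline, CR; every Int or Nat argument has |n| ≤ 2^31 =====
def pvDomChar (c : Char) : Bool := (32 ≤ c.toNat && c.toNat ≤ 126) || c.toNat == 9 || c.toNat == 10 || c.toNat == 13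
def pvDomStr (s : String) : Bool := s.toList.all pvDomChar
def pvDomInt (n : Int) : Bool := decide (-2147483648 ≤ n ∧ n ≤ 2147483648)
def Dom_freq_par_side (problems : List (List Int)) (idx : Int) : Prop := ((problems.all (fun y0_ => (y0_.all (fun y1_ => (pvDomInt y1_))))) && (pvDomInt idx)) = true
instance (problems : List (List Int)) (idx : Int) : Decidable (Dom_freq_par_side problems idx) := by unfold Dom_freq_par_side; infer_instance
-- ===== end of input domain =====

-- B replaces A's Counter frequency table (and the unused set) by sorting the extracted
-- values and scanning consecutive equal runs; same formula, alternative algorithm.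

-- ===== PORT A =====
def freq_par_side (problems : List (List Int)) (idx : Int) : Int :=
  let vals := problems.map (fun p => (PySem.List.pyGet? p idx).getD 0)  -- total under Pre_ (index in range)
  let _xs := PySem.Set.ofList vals
  let freqs_idx := PySem.Dict.counter vals
  let total : Int := problems.length
  (PySem.Dict.values freqs_idx).foldl
    (fun ret num_line =>
      let num_rest := total - num_line
      ret + PySem.Int.floordiv (num_line * (num_line - 1)) 2 * num_rest) 0

-- ===== PORT B =====
-- B-side helper: scan the sorted values run by consecutive equal run (itertools.groupby)
def pvRunScan (total : Int) : List Int → Int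
  | [] => 0
  | v :: rest =>
      let f : Int := 1 + (rest.takeWhile (fun x => x == v)).length
      PySem.Int.floordiv (f * (f - 1)) 2 * (total - f) +
        pvRunScan total (rest.dropWhile (fun x => x == v))
  termination_by l => l.length
  decreasing_by
    simpa using Nat.lt_succ_of_le (List.Sublist.length_le (List.dropWhile_sublist _))

def freq_par_side_alt (problems : List (List Int)) (idx : Int) : Int :=
  let vals := problems.map (fun p => (PySem.List.pyGet? p idx).getD 0)  -- total under Pre_ (index in range)
  pvRunScan problems.length (PySem.List.sorted vals (fun x => x) false)

-- ===== PRECONDITION & SPEC =====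
-- Pre_ excludes exactly the inputs where p[idx] raises IndexError in A (and in B).
def Pre_freq_par_side (problems : List (List Int)) (idx : Int) : Prop :=
  ∀ p ∈ problems, PySem.Raise.InRange p.length idx
instance (problems : List (List Int)) (idx : Int) : Decidable (Pre_freq_par_side problems idx) := by unfold Pre_freq_par_side; infer_instance
def pvWitness_freq_par_side : List (List Int) × Int := ([[1, 5], [2, 5], [1, 7]], 0)

def Spec_freq_par_side (problems : List (List Int)) (idx : Int) (out : Int) : Prop := out = freq_par_side_alt problems idx
instance (problems : List (List Int)) (idx : Int) (out : Int) : Decidable (Spec_freq_par_side problems idx out) := by unfold Spec_freq_par_side; infer_instance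

-- ===== CLAIM (what is proved, stated in full; the proofs are below) =====
def Claim_equal_freq_par_side : Prop := ∀ (problems : List (List Int)) (idx : Int), Dom_freq_par_side problems idx → Pre_freq_par_side problems idx → Spec_freq_par_side problems idx (freq_par_side problems idx)

-- ===== LEMMAS AND PROOFS =====

-- the per-value contribution
def pvG (total f : Int) : Int := PySem.Int.floordiv (f * (f - 1)) 2 * (total - f)

-- A's loop over Counter values is the sum of pvG over the distinct values (first occurrences)
lemma pvA_eq (vals : List Int) (total : Int) :
    (PySem.Dict.values (PySem.Dict.counter vals)).foldl
      (fun ret num_line => ret + PySem.Int.floordiv (num_line * (num_line - 1)) 2 * (total - num_line)) 0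
    = ((PySem.Set.ofList vals).map (fun v => pvG total (vals.count v : Int))).sum := by
  have hv : PySem.Dict.values (PySem.Dict.counter vals)
      = (PySem.Set.ofList vals).map (fun k => (vals.count k : Int)) := by
    simp [PySem.Dict.values, PySem.Dict.items_counter, List.map_map, Function.comp]
  rw [hv, PySem.List.foldl_add (g := fun n => PySem.Int.floordiv (n * (n - 1)) 2 * (total - n))]
  simp only [zero_add, List.map_map]
  rfl

-- on a weakly increasing list, dropping the leading run of v removes every v
lemma pv_not_mem_dropWhile (v : Int) : ∀ (l : List Int), (∀ x ∈ l, v ≤ x) → l.Pairwise (· ≤ ·) →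
    v ∉ l.dropWhile (fun x => x == v) := by
  intro l
  induction l with
  | nil => simp
  | cons a l ih =>
    intro hge hp hmem
    rw [List.dropWhile_cons] at hmem
    by_cases hav : (a == v) = true
    · rw [if_pos hav] at hmem
      exact ih (fun x hx => hge x (List.mem_cons_of_mem a hx)) (List.pairwise_cons.mp hp).2 hmem
    · rw [if_neg hav] at hmem
      rcases List.mem_cons.mp hmem with rfl | hmem'
      · simp at hav
      · have hav' : a ≠ v := fun hh => hav (by simp [hh])
        have hva : v < a := lt_of_le_of_ne (hge a (by simp)) (Ne.symm hav')
        have hal : a ≤ v := (List.pairwise_cons.mp hp).1 v hmem'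
        omega

lemma pvRunScan_eq_aux (total : Int) : ∀ (n : Nat) (s : List Int), s.length ≤ n → s.Pairwise (· ≤ ·) →
    pvRunScan total s = ((PySem.Set.ofList s).map (fun v => pvG total (s.count v : Int))).sum := by
  intro n
  induction n with
  | zero =>
    intro s hlen _
    have : s = [] := List.eq_nil_of_length_eq_zero (Nat.le_zero.mp hlen)
    subst this
    simp [pvRunScan, PySem.Set.ofList]
  | succ n ihn =>
    intro s hlen h
    match s with
    | [] => simp [pvRunScan, PySem.Set.ofList]
    | v :: rest =>
    have ih : ∀ (s' : List Int), s'.length ≤ rest.length → s'.Pairwise (· ≤ ·) →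
        pvRunScan total s' = ((PySem.Set.ofList s').map (fun w => pvG total (s'.count w : Int))).sum := by
      intro s' hl hp
      exact ihn s' (le_trans hl (by simpa using Nat.le_of_succ_le_succ hlen)) hp
    have hrest : rest.Pairwise (· ≤ ·) := (List.pairwise_cons.mp h).2
    have hvle : ∀ x ∈ rest, v ≤ x := (List.pairwise_cons.mp h).1
    set t := rest.takeWhile (fun x => x == v) with ht
    set d := rest.dropWhile (fun x => x == v) with hd
    have hsplit : t ++ d = rest := List.takeWhile_append_dropWhile
    have htv : ∀ x ∈ t, x = v := by
      intro x hx
      simpa using (List.mem_takeWhile_imp hx)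
    have hdle : d.Pairwise (· ≤ ·) := hrest.sublist (List.dropWhile_sublist _)
    -- v does not occur in d
    have hvd : v ∉ d := by
      rw [hd]
      exact pv_not_mem_dropWhile v rest hvle hrest
    -- counts
    have hct : t.count v = t.length := by
      rw [List.count_eq_length]; intro b hb; exact (htv b hb).symm
    have hcd0 : d.count v = 0 := List.count_eq_zero.mpr hvd
    have hcount : (v :: rest).count v = 1 + t.length := by
      rw [← hsplit]; simp [List.count_append, hct, hcd0]
      omega
    have hcw : ∀ w, w ≠ v → (v :: rest).count w = d.count w := by
      intro w hw
      rw [← hsplit]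
      have hctw : t.count w = 0 := List.count_eq_zero.mpr (by
        intro hwmem; exact hw (htv w hwmem))
      simp [List.count_append, hctw, Ne.symm hw]
    -- distinct values: ofList (v::rest) is a permutation of v :: ofList d
    have hnodup1 : (PySem.Set.ofList (v :: rest)).Nodup := PySem.Set.nodup_ofList _
    have hnodup2 : (v :: PySem.Set.ofList d).Nodup := by
      refine List.nodup_cons.mpr ⟨?_, PySem.Set.nodup_ofList _⟩
      simpa [PySem.Set.mem_ofList] using hvd
    have hmem : ∀ x, x ∈ PySem.Set.ofList (v :: rest) ↔ x ∈ v :: PySem.Set.ofList d := by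
      intro x
      simp only [PySem.Set.mem_ofList, List.mem_cons]
      constructor
      · rintro (rfl | hx)
        · exact Or.inl rfl
        · rw [← hsplit] at hx
          rcases List.mem_append.mp hx with hx | hx
          · exact Or.inl (htv x hx)
          · exact Or.inr hx
      · rintro (rfl | hx)
        · exact Or.inl rfl
        · exact Or.inr (hsplit ▸ List.mem_append_right t hx)
    have hperm : (PySem.Set.ofList (v :: rest)).Perm (v :: PySem.Set.ofList d) :=
      (List.perm_ext_iff_of_nodup hnodup1 hnodup2).mpr hmem
    -- assemble
    have hsum : ((PySem.Set.ofList (v :: rest)).map (fun w => pvG total ((v :: rest).count w : Int))).sum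
        = ((v :: PySem.Set.ofList d).map (fun w => pvG total ((v :: rest).count w : Int))).sum :=
      (hperm.map _).sum_eq
    have hmapd : (PySem.Set.ofList d).map (fun w => pvG total ((v :: rest).count w : Int))
        = (PySem.Set.ofList d).map (fun w => pvG total (d.count w : Int)) := by
      apply List.map_congr_left
      intro w hw
      have hwd : w ∈ d := (PySem.Set.mem_ofList _ _).mp hw
      have hwv : w ≠ v := fun hwv => hvd (hwv ▸ hwd)
      rw [hcw w hwv]
    have hf : pvG total (1 + ((rest.takeWhile (fun x => x == v)).length : Int))
        = pvG total (((v :: rest).count v : Int)) := by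
      rw [hcount, ← ht]; push_cast; ring_nf
    have hstep : pvRunScan total (v :: rest) =
        pvG total (1 + ((rest.takeWhile (fun x => x == v)).length : Int)) +
          pvRunScan total (rest.dropWhile (fun x => x == v)) := by
      rw [pvRunScan]
      rfl
    rw [hstep, hf, ← hd, hsum, List.map_cons, List.sum_cons, hmapd,
      ih d (by rw [← hsplit]; simp) hdle]

-- ===== VERDICT (by name: the statement is the Claim_ definition above) =====
theorem freq_par_side_spec : Claim_equal_freq_par_side := by
  intro problems idx _ _
  unfold Spec_freq_par_side freq_par_side freq_par_side_alt
  set vals := problems.map (fun p => (PySem.List.pyGet? p idx).getD 0) with hvals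
  set total : Int := (problems.length : Int)
  set s := PySem.List.sorted vals (fun x => x) false with hs
  have hperm : s.Perm vals := PySem.List.sorted_perm ..
  have hpair : s.Pairwise (· ≤ ·) := by
    simpa using PySem.List.sorted_pairwise (xs := vals) (key := fun x => x)
  rw [pvA_eq, pvRunScan_eq_aux total s.length s le_rfl hpair]
  have hpermd : (PySem.Set.ofList vals).Perm (PySem.Set.ofList s) := by
    refine (List.perm_ext_iff_of_nodup (PySem.Set.nodup_ofList _) (PySem.Set.nodup_ofList _)).mpr ?_
    intro x
    simp only [PySem.Set.mem_ofList]
    exact ⟨fun h => hperm.mem_iff.mpr h, fun h => hperm.mem_iff.mp h⟩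
  have hcnt : ∀ v, s.count v = vals.count v := fun v => hperm.count_eq v
  calc ((PySem.Set.ofList vals).map (fun v => pvG total (vals.count v : Int))).sum
      = ((PySem.Set.ofList s).map (fun v => pvG total (vals.count v : Int))).sum :=
        (hpermd.map _).sum_eq
    _ = ((PySem.Set.ofList s).map (fun v => pvG total (s.count v : Int))).sum := by
        apply congrArg List.sum
        apply List.map_congr_left
        intro w _; rw [hcnt w]
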